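-- pv_equiv track=rewrite | github.com/wxxv/GRED_CandC | generate/debug_by_ref_dvqs.py | remove_having
-- ===== SOURCE A (Python) =====
-- def remove_having(text:str):
--     structure_tokens1 = ['visualize', 'select', 'from', 'where', 'group', 'order', 'limit', 'intersect', 'having', 'bin']
--     text = text.split()
--     text_new = []
--     flag = ""
--     for token in text:
--         if token.lower() in structure_tokens1:
--             flag = token.lower()
--         if flag == "having":
--             continue
--         text_new.append(token)
--     text = text_new
--     return " ".join(text)
-- ===== SOURCE B (Python) =====
-- def remove_having(text: str):
--     structure_tokens1 = ['visualize', 'select', 'from', 'where', 'group', 'order', 'limit', 'intersect', 'having', 'bin']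
--     segments = []
--     current = []
--     for token in text.split():
--         if token.lower() in structure_tokens1:
--             segments.append(current)
--             current = [token]
--         else:
--             current.append(token)
--     segments.append(current)
--     kept = [seg for seg in segments if not (seg and seg[0].lower() == 'having')]
--     return " ".join(token for seg in kept for token in seg)
-- ===== Notes on version B (the rewrite author's own statement) =====
-- stated objective: alternative
-- what changed: Replaces the flag-carrying single pass with a two-phase segmentation: tokens are grouped into clause segments starting at each structure keyword, then segments whose first token lowercases to 'having' are filtered out and the rest flattened and joined.
import Mathlib
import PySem

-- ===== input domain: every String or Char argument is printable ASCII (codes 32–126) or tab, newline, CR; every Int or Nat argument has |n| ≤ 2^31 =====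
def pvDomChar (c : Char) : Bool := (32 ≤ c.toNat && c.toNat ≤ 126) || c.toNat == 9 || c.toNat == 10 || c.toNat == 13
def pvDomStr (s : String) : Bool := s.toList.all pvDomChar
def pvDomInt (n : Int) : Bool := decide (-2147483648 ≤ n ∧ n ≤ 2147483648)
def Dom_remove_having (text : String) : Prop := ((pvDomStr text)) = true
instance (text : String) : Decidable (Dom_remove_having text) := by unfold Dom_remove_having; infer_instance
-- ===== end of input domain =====

-- B re-implements A as segmentation-then-filter over keyword-delimited token groups (same cost, different decomposition).

-- shared constant: the structure-keyword list both Pythons spell out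
def pvKws : List String :=
  ["visualize", "select", "from", "where", "group", "order", "limit", "intersect", "having", "bin"]

-- ===== PORT A =====
-- loop body of A: state = (text_new, flag)
def remove_having_step (st : List String × String) (token : String) : List String × String :=
  let flag := if pvKws.contains (PySem.Str.lower token) then PySem.Str.lower token else st.2
  if flag = "having" then (st.1, flag) else (st.1 ++ [token], flag)

def remove_having (text : String) : String :=
  let res := (PySem.Str.split₀ text).foldl remove_having_step ([], "")
  PySem.Str.join " " res.1

-- ===== PORT B =====
-- loop body of B: state = (segments, current)
def remove_having_alt_step (st : List (List String) × List String) (token : String) :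
    List (List String) × List String :=
  if pvKws.contains (PySem.Str.lower token) then (st.1 ++ [st.2], [token]) else (st.1, st.2 ++ [token])

-- 'seg and seg[0].lower() == "having"'
def remove_having_drop (seg : List String) : Bool :=
  match seg.head? with
  | some h => PySem.Str.lower h == "having"
  | none => false

def remove_having_alt (text : String) : String :=
  let st := (PySem.Str.split₀ text).foldl remove_having_alt_step ([], [])
  let segments := st.1 ++ [st.2]
  let kept := segments.filter (fun seg => !remove_having_drop seg)
  PySem.Str.join " " kept.flatten

-- ===== PRECONDITION & SPEC =====
def Spec_remove_having (text : String) (out : String) : Prop := out = remove_having_alt text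
instance (text : String) (out : String) : Decidable (Spec_remove_having text out) := by unfold Spec_remove_having; infer_instance

-- ===== CLAIM (what is proved, stated in full; the proofs are below) =====
def Claim_equal_remove_having : Prop := ∀ (text : String), Dom_remove_having text → Spec_remove_having text (remove_having text)

-- ===== LEMMAS AND PROOFS =====

-- common specification of the kept tokens; b = "currently inside a having clause"
def pvSpec : List String → Bool → List String
  | [], _ => []
  | t :: ts, b =>
    if pvKws.contains (PySem.Str.lower t) then
      (if PySem.Str.lower t = "having" then [] else [t]) ++ pvSpec ts (PySem.Str.lower t == "having")
    else
      (if b then [] else [t]) ++ pvSpec ts b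

theorem pvA_foldl (ts : List String) : ∀ (acc : List String) (flag : String),
    (ts.foldl remove_having_step (acc, flag)).1 = acc ++ pvSpec ts (flag == "having") := by
  induction ts with
  | nil => intro acc flag; simp [pvSpec]
  | cons t ts ih =>
    intro acc flag
    simp only [List.foldl_cons, remove_having_step, pvSpec]
    by_cases hk : pvKws.contains (PySem.Str.lower t)
    · simp only [hk, if_true]
      by_cases hh : PySem.Str.lower t = "having"
      · simp [hh, ih]
      · simp [hh, ih]
    · simp only [hk, if_false, Bool.false_eq_true]
      by_cases hh : flag = "having"
      · simp [hh, ih]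
      · simp [hh, ih, beq_iff_eq]

theorem pvDrop_append_nonkw (cur : List String) (t : String)
    (ht : pvKws.contains (PySem.Str.lower t) = false) :
    remove_having_drop (cur ++ [t]) = remove_having_drop cur := by
  cases cur with
  | nil =>
    simp only [List.nil_append, remove_having_drop, List.head?]
    have : PySem.Str.lower t ≠ "having" := by
      intro h; rw [h] at ht; simp only [List.contains_eq_mem, decide_eq_false_iff_not] at ht
      exact ht (by decide)
    simp [this]
  | cons a l => simp [remove_having_drop]

theorem pvB_foldl (ts : List String) : ∀ (segs : List (List String)) (cur : List String),
    (((ts.foldl remove_having_alt_step (segs, cur)).1 ++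
        [(ts.foldl remove_having_alt_step (segs, cur)).2]).filter
          (fun seg => !remove_having_drop seg)).flatten
      = ((segs.filter (fun seg => !remove_having_drop seg)).flatten
          ++ (if remove_having_drop cur then [] else cur)) ++ pvSpec ts (remove_having_drop cur) := by
  induction ts with
  | nil =>
    intro segs cur
    simp only [List.foldl_nil, List.filter_append, List.flatten_append, pvSpec, List.append_nil]
    cases h : remove_having_drop cur <;> simp [List.filter, h]
  | cons t ts ih =>
    intro segs cur
    simp only [List.foldl_cons, remove_having_alt_step, pvSpec]
    by_cases hk : pvKws.contains (PySem.Str.lower t)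
    · simp only [hk, if_true]
      rw [ih]
      have hdt : remove_having_drop [t] = (PySem.Str.lower t == "having") := by
        simp [remove_having_drop]
      rw [hdt]
      simp only [List.filter_append, List.flatten_append]
      by_cases hh : PySem.Str.lower t = "having"
      · cases hc : remove_having_drop cur <;>
          simp [List.filter, hc, hh]
      · cases hc : remove_having_drop cur <;>
          simp [List.filter, hc, hh]
    · simp only [hk, if_false, Bool.false_eq_true]
      rw [ih, pvDrop_append_nonkw cur t (by simpa using hk)]
      cases hc : remove_having_drop cur <;> simp

theorem pvMain (text : String) : remove_having text = remove_having_alt text := by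
  simp only [remove_having, remove_having_alt]
  rw [pvA_foldl, pvB_foldl]
  have h1 : ("" == "having") = false := by decide
  have h2 : remove_having_drop [] = false := rfl
  rw [h1, h2]
  simp only [List.filter_nil, List.flatten_nil, List.nil_append, Bool.false_eq_true, if_false]

-- ===== VERDICT (by name: the statement is the Claim_ definition above) =====
theorem remove_having_spec : Claim_equal_remove_having := by
  intro text _
  unfold Spec_remove_having
  exact pvMain text
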